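-- pv_equiv track=rewrite | github.com/rhi-zone/normalize | src/moss/architect_editor.py | _parse_step_header
-- ===== SOURCE A (Python) =====
-- from typing import TYPE_CHECKING, Any, Protocol, runtime_checkable
--
-- def _parse_step_header(line: str) -> dict[str, Any]:
--     """Parse a step header line like '1. TYPE:replace TARGET:foo REASON:bar'."""
--     # Remove step number
--     rest = line.split(".", 1)[1].strip() if "." in line else line
--
--     step: dict[str, Any] = {"type": "replace", "target": "", "reason": "", "content": ""}
--
--     # Parse key:value pairs
--     parts = rest.split()
--     for part in parts:
--         if ":" in part:
--             key, val = part.split(":", 1)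
--             key = key.upper()
--             if key == "TYPE":
--                 step["type"] = val.lower()
--             elif key == "TARGET":
--                 step["target"] = val
--
--     # REASON might be the rest of the line after other parts
--     if "REASON:" in rest.upper():
--         idx = rest.upper().find("REASON:")
--         step["reason"] = rest[idx + 7 :].strip()
--
--     return step
-- ===== SOURCE B (Python) =====
-- def _parse_step_header(line: str):
--     """Parse a step header line like '1. TYPE:replace TARGET:foo REASON:bar'."""
--     rest = line.split(".", 1)[1].strip() if "." in line else line
--     tokens = rest.split()
--
--     def last_value(key):
--         # last key:value token wins == first match scanning from the right
--         for tok in reversed(tokens):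
--             if ":" in tok:
--                 k, v = tok.split(":", 1)
--                 if k.upper() == key:
--                     return v
--         return None
--
--     t = last_value("TYPE")
--     tgt = last_value("TARGET")
--     idx = rest.upper().find("REASON:")
--     return {
--         "type": t.lower() if t is not None else "replace",
--         "target": tgt if tgt is not None else "",
--         "reason": rest[idx + 7:].strip() if idx >= 0 else "",
--         "content": "",
--     }
-- ===== Notes on version B (the rewrite author's own statement) =====
-- stated objective: alternative
-- what changed: A mutates a default dict in a forward last-wins token loop; B instead does two right-to-left first-match scans of the token list (one for TYPE, one for TARGET), computes REASON via a single case-insensitive find, and builds the result dict directly at the end.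
import Mathlib
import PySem

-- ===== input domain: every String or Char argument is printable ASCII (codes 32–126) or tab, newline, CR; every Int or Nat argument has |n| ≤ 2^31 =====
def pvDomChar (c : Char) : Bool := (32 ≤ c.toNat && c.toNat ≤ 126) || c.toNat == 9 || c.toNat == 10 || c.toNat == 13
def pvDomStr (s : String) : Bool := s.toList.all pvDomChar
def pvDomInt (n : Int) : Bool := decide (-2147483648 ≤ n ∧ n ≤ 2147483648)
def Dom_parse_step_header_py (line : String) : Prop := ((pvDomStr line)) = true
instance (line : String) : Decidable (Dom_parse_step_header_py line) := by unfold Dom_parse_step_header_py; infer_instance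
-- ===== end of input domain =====

-- B replaces A's forward last-wins token loop over a mutated dict by two right-to-left
-- first-match scans and builds the result list directly (objective: alternative, same cost).

-- ===== PORT A =====
-- loop body of A's 'for part in parts' (a dict update per token)
def pvStepA (d : PySem.Dict String String) (part : String) : PySem.Dict String String :=
  if PySem.Str.isIn ":" part then
    let kv := (PySem.Str.splitMax? part ":" 1).getD []
    let key := PySem.Str.upper (kv.getD 0 "")
    let val := kv.getD 1 ""
    if key == "TYPE" then d.insert "type" (PySem.Str.lower val)
    else if key == "TARGET" then d.insert "target" val
    else d
  else d

def parse_step_header_py (line : String) : List (String × String) :=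
  let rest := if PySem.Str.isIn "." line
    then PySem.Str.strip (((PySem.Str.splitMax? line "." 1).getD []).getD 1 "")
    else line
  let step : PySem.Dict String String :=
    (((PySem.Dict.empty.insert "type" "replace").insert "target" "").insert "reason" "").insert "content" ""
  let parts := PySem.Str.split₀ rest
  let step := parts.foldl pvStepA step
  let step := if PySem.Str.isIn "REASON:" (PySem.Str.upper rest) then
      let idx := PySem.Str.find (PySem.Str.upper rest) "REASON:"
      step.insert "reason" (PySem.Str.strip (PySem.Str.slice rest (some (idx + 7)) none))
    else step
  step.items

-- ===== PORT B =====
-- B's 'last_value': first match scanning the reversed token list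
def pvLastValue (key : String) : List String → Option String
  | [] => none
  | tok :: toks =>
    if PySem.Str.isIn ":" tok then
      let kv := (PySem.Str.splitMax? tok ":" 1).getD []
      if PySem.Str.upper (kv.getD 0 "") == key then some (kv.getD 1 "")
      else pvLastValue key toks
    else pvLastValue key toks

def parse_step_header_py_alt (line : String) : List (String × String) :=
  let rest := if PySem.Str.isIn "." line
    then PySem.Str.strip (((PySem.Str.splitMax? line "." 1).getD []).getD 1 "")
    else line
  let tokens := PySem.Str.split₀ rest
  let t := pvLastValue "TYPE" tokens.reverse
  let tgt := pvLastValue "TARGET" tokens.reverse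
  let idx := PySem.Str.find (PySem.Str.upper rest) "REASON:"
  [("type", match t with | some v => PySem.Str.lower v | none => "replace"),
   ("target", tgt.getD ""),
   ("reason", if 0 ≤ idx then PySem.Str.strip (PySem.Str.slice rest (some (idx + 7)) none) else ""),
   ("content", "")]

-- ===== PRECONDITION & SPEC =====
def Spec_parse_step_header_py (line : String) (out : List (String × String)) : Prop := out = parse_step_header_py_alt line
instance (line : String) (out : List (String × String)) : Decidable (Spec_parse_step_header_py line out) := by unfold Spec_parse_step_header_py; infer_instance

-- ===== CLAIM (what is proved, stated in full; the proofs are below) =====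
def Claim_equal_parse_step_header_py : Prop := ∀ (line : String), Dom_parse_step_header_py line → Spec_parse_step_header_py line (parse_step_header_py line)

-- ===== LEMMAS AND PROOFS =====
-- the shape A's dict keeps throughout the token loop
def pvDict4 (t g : String) : PySem.Dict String String :=
  (((PySem.Dict.empty.insert "type" t).insert "target" g).insert "reason" "").insert "content" ""

theorem pvLastValue_append (key : String) (l1 l2 : List String) :
    pvLastValue key (l1 ++ l2) = (pvLastValue key l1).orElse (fun _ => pvLastValue key l2) := by
  induction l1 with
  | nil => simp [pvLastValue]
  | cons tok toks ih =>
    simp only [List.cons_append, pvLastValue]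
    split_ifs with h1 h2 <;> simp [ih]

theorem pvStep_eq (p t g : String) :
    pvStepA (pvDict4 t g) p =
      pvDict4 ((pvLastValue "TYPE" [p]).elim t PySem.Str.lower)
              ((pvLastValue "TARGET" [p]).getD g) := by
  simp only [pvStepA, pvLastValue]
  split_ifs with h1 h2 h3 <;> simp_all <;> rfl

theorem pvFold_eq (parts : List String) (t g : String) :
    parts.foldl pvStepA (pvDict4 t g) =
      pvDict4 ((pvLastValue "TYPE" parts.reverse).elim t PySem.Str.lower)
              ((pvLastValue "TARGET" parts.reverse).getD g) := by
  induction parts generalizing t g with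
  | nil => simp [pvLastValue]
  | cons p ps ih =>
    rw [List.foldl_cons, pvStep_eq, ih]
    have hrev : (p :: ps).reverse = ps.reverse ++ [p] := by simp
    rw [hrev, pvLastValue_append, pvLastValue_append]
    cases pvLastValue "TYPE" ps.reverse <;> cases pvLastValue "TARGET" ps.reverse <;>
      simp [Option.orElse]

theorem pvItems_insert_reason (t g r : String) :
    ((pvDict4 t g).insert "reason" r).items = [("type",t),("target",g),("reason",r),("content","")] := rfl

theorem pvItems_dict4 (t g : String) :
    (pvDict4 t g).items = [("type",t),("target",g),("reason",""),("content","")] := rfl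

-- ===== VERDICT (by name: the statement is the Claim_ definition above) =====
theorem parse_step_header_py_spec : Claim_equal_parse_step_header_py := by
  intro line _
  unfold Spec_parse_step_header_py parse_step_header_py parse_step_header_py_alt
  dsimp only
  set rest := if PySem.Str.isIn "." line
    then PySem.Str.strip (((PySem.Str.splitMax? line "." 1).getD []).getD 1 "")
    else line with hrest
  have hbase : (((PySem.Dict.empty.insert "type" "replace").insert "target" "").insert "reason" "").insert "content" ""
      = pvDict4 "replace" "" := rfl
  rw [hbase, pvFold_eq]
  have hiff : PySem.Str.isIn "REASON:" (PySem.Str.upper rest) = true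
      ↔ 0 ≤ PySem.Str.find (PySem.Str.upper rest) "REASON:" := by
    rw [PySem.Str.isIn_iff_infix, ← PySem.Str.find_nonneg_iff]
  by_cases hr : PySem.Str.isIn "REASON:" (PySem.Str.upper rest) = true
  · have h0 : 0 ≤ PySem.Str.find (PySem.Str.upper rest) "REASON:" := hiff.mp hr
    rw [if_pos hr, if_pos h0]
    rw [pvItems_insert_reason]
    cases pvLastValue "TYPE" (PySem.Str.split₀ rest).reverse <;>
      cases pvLastValue "TARGET" (PySem.Str.split₀ rest).reverse <;> rfl
  · have h0 : ¬ 0 ≤ PySem.Str.find (PySem.Str.upper rest) "REASON:" := fun h => hr (hiff.mpr h)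
    rw [if_neg hr, if_neg h0, pvItems_dict4]
    cases pvLastValue "TYPE" (PySem.Str.split₀ rest).reverse <;>
      cases pvLastValue "TARGET" (PySem.Str.split₀ rest).reverse <;> rfl
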